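-- pv_equiv track=rewrite | github.com/EdivaneNovais/escola.tech.vida.nova | estrutura_de_dados/elementos_repetidos.py | rep_1
-- ===== SOURCE A (Python) =====
-- def rep_1(lista):
--   repetidos = []
--   operacoes = 0
--   for i in range(len(lista)):
--     for j in range(i + 1, len(lista)):
--       operacoes += 1
--       if lista[i] == lista[j]:
--         repetidos.append(lista[i])
--   return repetidos, operacoes
-- ===== SOURCE B (Python) =====
-- def rep_1(lista):
--     counts = {}
--     rev = []
--     for v in reversed(lista):
--         c = counts.get(v, 0)
--         rev.extend([v] * c)
--         counts[v] = c + 1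
--     n = len(lista)
--     return rev[::-1], n * (n - 1) // 2
-- ===== Notes on version B (the rewrite author's own statement) =====
-- stated objective: alternative
-- what changed: A's nested all-pairs index scan is replaced by a single right-to-left pass keeping a suffix-occurrence-count dict (emitting each value c times, then reversing the accumulated list) and the closed form n*(n-1)//2 for the comparison counter; the cost becomes O(n + output size) instead of O(n^2), though on duplicate-heavy inputs the output itself is quadratic.
import Mathlib
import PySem

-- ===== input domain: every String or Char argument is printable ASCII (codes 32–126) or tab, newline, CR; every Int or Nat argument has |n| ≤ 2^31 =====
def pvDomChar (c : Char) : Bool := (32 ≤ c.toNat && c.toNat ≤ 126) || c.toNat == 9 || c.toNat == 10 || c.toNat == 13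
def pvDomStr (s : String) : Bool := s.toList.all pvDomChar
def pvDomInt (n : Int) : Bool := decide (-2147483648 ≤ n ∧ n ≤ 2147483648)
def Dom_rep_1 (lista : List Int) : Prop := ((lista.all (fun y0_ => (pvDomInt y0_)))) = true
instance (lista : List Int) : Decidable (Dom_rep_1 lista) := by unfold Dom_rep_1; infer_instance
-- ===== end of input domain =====

-- B replaces A's nested pairwise scan by one right-to-left pass with a suffix-count dict
-- and the closed form n(n-1)//2 for the comparison counter (same return value).

-- ===== PORT A =====
-- the indices i, j produced by pyRange are always in range here, so pyGetD with default 0 is exact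
def rep_1 (lista : List Int) : List Int × Int :=
  (PySem.List.pyRange 0 (lista.length : Int) 1).foldl (fun st i =>
    (PySem.List.pyRange (i + 1) (lista.length : Int) 1).foldl (fun st2 j =>
      let st3 : List Int × Int := (st2.1, st2.2 + 1)
      if PySem.List.pyGetD lista i 0 = PySem.List.pyGetD lista j 0 then
        (st3.1 ++ [PySem.List.pyGetD lista i 0], st3.2)
      else st3) st) ([], 0)

-- ===== PORT B =====
def rep_1_alt (lista : List Int) : List Int × Int :=
  let st := lista.reverse.foldl (fun (st : PySem.Dict Int Int × List Int) v =>
    let c := st.1.getD v 0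
    (st.1.insert v (c + 1), st.2 ++ List.replicate c.toNat v))
    (PySem.Dict.empty, [])
  (st.2.reverse,
    PySem.Int.floordiv ((lista.length : Int) * ((lista.length : Int) - 1)) 2)

-- ===== PRECONDITION & SPEC =====
def Spec_rep_1 (lista : List Int) (out : List Int × Int) : Prop := out = rep_1_alt lista
instance (lista : List Int) (out : List Int × Int) : Decidable (Spec_rep_1 lista out) := by unfold Spec_rep_1; infer_instance

-- ===== CLAIM (what is proved, stated in full; the proofs are below) =====
def Claim_equal_rep_1 : Prop := ∀ (lista : List Int), Dom_rep_1 lista → Spec_rep_1 lista (rep_1 lista)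

-- ===== LEMMAS AND PROOFS =====

-- common characterisation of both programs: for each position, its value repeated once per
-- equal later element, concatenated in position order; plus the comparison count
def fRep : List Int → List Int × Int
  | [] => ([], 0)
  | x :: xs => (List.replicate (xs.count x) x ++ (fRep xs).1, (xs.length : Int) + (fRep xs).2)

-- A's inner loop: appends lista[i] once per equal element of the suffix from b, counts len - b
theorem rep_1_inner (lista : List Int) (i : Int) (k : Nat) :
    ∀ (b : Int) (st : List Int × Int), 0 ≤ b → b ≤ (lista.length : Int) →
    ((lista.length : Int) - b).toNat = k →
    (PySem.List.pyRange b (lista.length : Int) 1).foldl (fun st2 j =>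
      let st3 : List Int × Int := (st2.1, st2.2 + 1)
      if PySem.List.pyGetD lista i 0 = PySem.List.pyGetD lista j 0 then
        (st3.1 ++ [PySem.List.pyGetD lista i 0], st3.2)
      else st3) st
    = (st.1 ++ List.replicate ((lista.drop b.toNat).count (PySem.List.pyGetD lista i 0)) (PySem.List.pyGetD lista i 0),
       st.2 + ((lista.length : Int) - b)) := by
  induction k with
  | zero =>
    intro b st hb hble hk
    have hbn : b = (lista.length : Int) := by omega
    subst hbn
    rw [PySem.List.pyRange_one_eq_nil le_rfl]
    simp [List.drop_eq_nil_of_le (le_refl lista.length)]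
  | succ k ih =>
    intro b st hb hble hk
    have hlt : b < (lista.length : Int) := by omega
    rw [PySem.List.pyRange_one_cons hlt]
    have hbl : b.toNat < lista.length := by omega
    have hdrop : lista.drop b.toNat = lista[b.toNat] :: lista.drop (b.toNat + 1) :=
      List.drop_eq_getElem_cons hbl
    have hget : PySem.List.pyGetD lista b 0 = lista[b.toNat] :=
      PySem.List.pyGetD_eq_getElem (xs:=lista) (i:=b) (d:=0) hb (by omega)
    have htonat : (b + 1).toNat = b.toNat + 1 := by omega
    simp only [List.foldl_cons]
    by_cases hv : PySem.List.pyGetD lista i 0 = PySem.List.pyGetD lista b 0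
    · rw [if_pos hv, ih (b+1) _ (by omega) (by omega) (by omega)]
      rw [hdrop, htonat]
      simp only [List.count_cons, hget, hv]
      simp [List.replicate_succ, List.append_assoc]
      omega
    · rw [if_neg hv, ih (b+1) _ (by omega) (by omega) (by omega)]
      rw [hdrop, htonat]
      simp only [List.count_cons]
      have : ¬ (lista[b.toNat] = PySem.List.pyGetD lista i 0) := by
        rw [← hget]; exact fun h => hv h.symm
      simp [this]
      omega

-- A's outer loop from index a computes fRep of the suffix
theorem rep_1_outer (lista : List Int) (k : Nat) :
    ∀ (a : Int) (st : List Int × Int), 0 ≤ a → a ≤ (lista.length : Int) →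
    ((lista.length : Int) - a).toNat = k →
    (PySem.List.pyRange a (lista.length : Int) 1).foldl (fun st i =>
      (PySem.List.pyRange (i + 1) (lista.length : Int) 1).foldl (fun st2 j =>
        let st3 : List Int × Int := (st2.1, st2.2 + 1)
        if PySem.List.pyGetD lista i 0 = PySem.List.pyGetD lista j 0 then
          (st3.1 ++ [PySem.List.pyGetD lista i 0], st3.2)
        else st3) st) st
    = (st.1 ++ (fRep (lista.drop a.toNat)).1, st.2 + (fRep (lista.drop a.toNat)).2) := by
  induction k with
  | zero =>
    intro a st ha hale hk
    have han : a = (lista.length : Int) := by omega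
    subst han
    rw [PySem.List.pyRange_one_eq_nil le_rfl]
    simp [List.drop_eq_nil_of_le (le_refl lista.length), fRep]
  | succ k ih =>
    intro a st ha hale hk
    have hlt : a < (lista.length : Int) := by omega
    rw [PySem.List.pyRange_one_cons hlt]
    have hal : a.toNat < lista.length := by omega
    have hdrop : lista.drop a.toNat = lista[a.toNat] :: lista.drop (a.toNat + 1) :=
      List.drop_eq_getElem_cons hal
    have hget : PySem.List.pyGetD lista a 0 = lista[a.toNat] :=
      PySem.List.pyGetD_eq_getElem (xs:=lista) (i:=a) (d:=0) ha (by omega)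
    have htonat : (a + 1).toNat = a.toNat + 1 := by omega
    simp only [List.foldl_cons]
    rw [rep_1_inner lista a ((lista.length : Int) - (a+1)).toNat (a+1) st (by omega) (by omega) rfl]
    rw [ih (a+1) _ (by omega) (by omega) (by omega)]
    rw [hdrop, htonat, hget]
    simp only [fRep]
    rw [Prod.ext_iff]
    refine ⟨List.append_assoc _ _ _, ?_⟩
    simp only [List.length_drop]
    omega

theorem rep_1_eq_fRep (lista : List Int) : rep_1 lista = fRep lista := by
  unfold rep_1
  rw [rep_1_outer lista (lista.length : Int).toNat 0 ([], 0) le_rfl (by omega) (by omega)]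
  simp

-- B's loop invariant: the dict holds the suffix counts, the accumulator is fRep's list reversed
theorem rep_1_alt_inv (lista : List Int) :
    (∀ v, ((lista.reverse.foldl (fun (st : PySem.Dict Int Int × List Int) v =>
      let c := st.1.getD v 0
      (st.1.insert v (c + 1), st.2 ++ List.replicate c.toNat v))
      (PySem.Dict.empty, [])).1).getD v 0 = (lista.count v : Int)) ∧
    ((lista.reverse.foldl (fun (st : PySem.Dict Int Int × List Int) v =>
      let c := st.1.getD v 0
      (st.1.insert v (c + 1), st.2 ++ List.replicate c.toNat v))
      (PySem.Dict.empty, [])).2 = (fRep lista).1.reverse) := by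
  induction lista with
  | nil => simp [fRep, PySem.Dict.getD_empty]
  | cons x xs ih =>
    obtain ⟨ih1, ih2⟩ := ih
    simp only [List.reverse_cons, List.foldl_append, List.foldl_cons, List.foldl_nil]
    constructor
    · intro v
      rw [PySem.Dict.getD_insert]
      by_cases hv : v = x
      · subst hv; rw [if_pos rfl, ih1, List.count_cons_self]; push_cast; ring
      · rw [if_neg hv, ih1, List.count_cons_of_ne (by exact fun h => hv h.symm)]
    · rw [ih2, ih1]
      simp only [fRep, List.reverse_append, List.reverse_replicate, Int.toNat_natCast]

theorem fRep_two_mul (lista : List Int) :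
    2 * (fRep lista).2 = (lista.length : Int) * ((lista.length : Int) - 1) := by
  induction lista with
  | nil => simp [fRep]
  | cons x xs ih =>
    simp only [fRep, List.length_cons]
    push_cast
    linarith

theorem fRep_snd (lista : List Int) :
    (fRep lista).2 = PySem.Int.floordiv ((lista.length : Int) * ((lista.length : Int) - 1)) 2 := by
  have h := fRep_two_mul lista
  exact ((PySem.Int.floordiv_eq_iff_of_pos (by norm_num)).2 ⟨by omega, by omega⟩).symm

theorem rep_1_alt_eq_fRep (lista : List Int) : rep_1_alt lista = fRep lista := by
  unfold rep_1_alt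
  obtain ⟨_, h2⟩ := rep_1_alt_inv lista
  simp only [h2, List.reverse_reverse, ← fRep_snd]

-- ===== VERDICT (by name: the statement is the Claim_ definition above) =====
theorem rep_1_spec : Claim_equal_rep_1 := by
  intro lista _
  unfold Spec_rep_1
  rw [rep_1_eq_fRep, rep_1_alt_eq_fRep]
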